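-- pv_equiv track=rewrite | github.com/benjamark/didymus | src/build_stairsteps.cu.py | remove_open_edges
-- ===== SOURCE A (Python) =====
-- from collections import defaultdict
--
-- def remove_open_edges(triangles):
--     edge_to_triangle = defaultdict(list)
--     for i, triangle in enumerate(triangles):
--         # Construct edges with sorted vertex indices to be comparable
--         edges = [tuple(sorted([triangle[j], triangle[(j + 1) % 3]])) for j in range(3)]
--         for edge in edges:
--             edge_to_triangle[edge].append(i)
--
--     # Identify edges that belong to only one triangle, these are open edges
--     open_edges = {edge for edge, tris in edge_to_triangle.items() if len(tris) == 1}
--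
--     # Triangles to delete are those that have an open edge
--     triangles_to_delete = set()
--     for edge in open_edges:
--         triangles_to_delete.update(edge_to_triangle[edge])
--
--     # Return new list without the triangles that have open edges
--     return [triangle for i, triangle in enumerate(triangles) if i not in triangles_to_delete]
-- ===== SOURCE B (Python) =====
-- def remove_open_edges(triangles):
--     # Sort-then-scan: sort the multiset of all (normalized) triangle edges, find
--     # singleton runs (= open edges) by one linear scan, keep triangles avoiding them.
--     es = sorted(tuple(sorted((t[j], t[(j + 1) % 3]))) for t in triangles for j in range(3))
--     open_edges = set()
--     i = 0
--     n = len(es)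
--     while i < n:
--         j = i + 1
--         while j < n and es[j] == es[i]:
--             j += 1
--         if j == i + 1:
--             open_edges.add(es[i])
--         i = j
--     return [t for t in triangles
--             if not any(tuple(sorted((t[j], t[(j + 1) % 3]))) in open_edges for j in range(3))]
-- ===== Notes on version B (the rewrite author's own statement) =====
-- stated objective: alternative
-- what changed: Replaced A's hash-based indexing (edge->triangle-index dict plus open-edge and triangles_to_delete sets) by sort-then-scan duplicate detection: sort the multiset of all normalized edges, collect singleton runs (the open edges) in one linear scan, and keep each triangle iff none of its edges is in that set.
import Mathlib
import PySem

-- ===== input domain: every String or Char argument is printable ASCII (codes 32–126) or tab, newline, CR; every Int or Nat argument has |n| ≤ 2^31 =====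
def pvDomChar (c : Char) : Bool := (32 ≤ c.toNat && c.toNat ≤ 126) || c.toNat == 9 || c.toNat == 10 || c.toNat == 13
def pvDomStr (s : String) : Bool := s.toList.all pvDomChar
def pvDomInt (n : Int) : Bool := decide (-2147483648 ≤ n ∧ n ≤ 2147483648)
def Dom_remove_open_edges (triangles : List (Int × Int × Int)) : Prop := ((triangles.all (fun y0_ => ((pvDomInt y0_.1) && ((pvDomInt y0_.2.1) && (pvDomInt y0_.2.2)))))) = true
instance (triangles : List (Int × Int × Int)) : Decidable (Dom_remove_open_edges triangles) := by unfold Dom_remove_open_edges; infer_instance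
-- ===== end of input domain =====

-- B replaces A's edge->triangle-index dict and its two derived index sets by
-- sort-then-scan: sort the multiset of all normalized edges, detect the
-- singleton runs (open edges) in one linear scan, and keep the triangles that
-- avoid them (objective: alternative — a sorting-based duplicate detection
-- instead of A's hash-indexing one).

-- shared helper: tuple(sorted([triangle[j], triangle[(j+1)%3]])) for j in range(3)
def pvSedge (a b : Int) : Int × Int := if a ≤ b then (a, b) else (b, a)

def pvTriEdges (t : Int × Int × Int) : List (Int × Int) :=
  [pvSedge t.1 t.2.1, pvSedge t.2.1 t.2.2, pvSedge t.2.2 t.1]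

-- ===== PORT A =====
def remove_open_edges (triangles : List (Int × Int × Int)) : List (Int × Int × Int) :=
  -- edge_to_triangle = defaultdict(list); for i, triangle in enumerate: append i per edge
  let edge_to_triangle : PySem.Dict (Int × Int) (List Int) :=
    (PySem.List.enumerate triangles).foldl
      (fun d it => (pvTriEdges it.2).foldl (fun d e => d.modify e [] (· ++ [it.1])) d)
      PySem.Dict.empty
  -- open_edges = {edge for edge, tris in edge_to_triangle.items() if len(tris) == 1}
  let open_edges : PySem.Set (Int × Int) :=
    PySem.Set.ofList ((edge_to_triangle.items.filter (fun p => p.2.length == 1)).map (·.1))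
  -- triangles_to_delete = set(); for edge in open_edges: update(edge_to_triangle[edge])
  let triangles_to_delete : PySem.Set Int :=
    open_edges.foldl (fun s e => PySem.Set.update s (edge_to_triangle.getD e [])) PySem.Set.empty
  -- [triangle for i, triangle in enumerate(triangles) if i not in triangles_to_delete]
  (PySem.List.enumerate triangles).filterMap
    (fun it => if triangles_to_delete.contains it.1 then none else some it.2)

-- ===== PORT B =====
-- the run scan over the sorted edge list: i advances run by run; a run of
-- length 1 (j == i+1, i.e. no following equal elements) adds its edge to the set
def pvScan : List (Int × Int) → PySem.Set (Int × Int) → PySem.Set (Int × Int)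
  | [], s => s
  | e :: rest, s =>
      if (rest.takeWhile (fun x => x == e)).length == 0 then
        pvScan (rest.dropWhile (fun x => x == e)) (PySem.Set.add s e)
      else
        pvScan (rest.dropWhile (fun x => x == e)) s
  termination_by l _ => l.length
  decreasing_by
    all_goals
      exact Nat.lt_succ_of_le (List.Sublist.length_le (List.dropWhile_sublist _))

def remove_open_edges_alt (triangles : List (Int × Int × Int)) : List (Int × Int × Int) :=
  -- es = sorted(edge for t in triangles for each of the 3 sorted edges)  (tuple = lex order)
  let es : List (Int × Int) :=
    PySem.List.sorted2 (triangles.flatMap pvTriEdges) (·.1) (·.2) false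
  -- while-scan over es collecting the singleton runs into open_edges
  let open_edges : PySem.Set (Int × Int) := pvScan es PySem.Set.empty
  -- [t for t in triangles if not any(edge in open_edges for each edge of t)]
  triangles.filter (fun t => !(pvTriEdges t).any (fun e => open_edges.contains e))

-- ===== PRECONDITION & SPEC =====
def Spec_remove_open_edges (triangles : List (Int × Int × Int)) (out : List (Int × Int × Int)) : Prop := out = remove_open_edges_alt triangles
instance (triangles : List (Int × Int × Int)) (out : List (Int × Int × Int)) : Decidable (Spec_remove_open_edges triangles out) := by unfold Spec_remove_open_edges; infer_instance

-- ===== CLAIM (what is proved, stated in full; the proofs are below) =====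
def Claim_equal_remove_open_edges : Prop := ∀ (triangles : List (Int × Int × Int)), Dom_remove_open_edges triangles → Spec_remove_open_edges triangles (remove_open_edges triangles)

-- ===== LEMMAS AND PROOFS =====

-- A's dict, named for the proofs
def pvDict (triangles : List (Int × Int × Int)) : PySem.Dict (Int × Int) (List Int) :=
  (PySem.List.enumerate triangles).foldl
    (fun d it => (pvTriEdges it.2).foldl (fun d e => d.modify e [] (· ++ [it.1])) d)
    PySem.Dict.empty

-- a modify-append loop over any key list appends i once per occurrence of e
theorem pv_modlist_getD (i : Int) (e : Int × Int) :
    ∀ (l : List (Int × Int)) (d : PySem.Dict (Int × Int) (List Int)),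
    (l.foldl (fun d e => d.modify e [] (· ++ [i])) d).getD e []
      = d.getD e [] ++ List.replicate (l.count e) i := by
  intro l
  induction l with
  | nil => intro d; simp
  | cons k l ih =>
      intro d
      simp only [List.foldl_cons, ih, PySem.Dict.getD_modify, List.count_cons]
      rcases eq_or_ne e k with h | h
      · simp [h, List.replicate_succ, List.append_assoc]
      · simp [h, Ne.symm h]

-- step over one triangle's three edges: appends i once per occurrence of e
theorem pv_step_getD (d : PySem.Dict (Int × Int) (List Int)) (i : Int)
    (t : Int × Int × Int) (e : Int × Int) :
    ((pvTriEdges t).foldl (fun d e => d.modify e [] (· ++ [i])) d).getD e []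
      = d.getD e [] ++ List.replicate ((pvTriEdges t).count e) i :=
  pv_modlist_getD i e _ d

-- the full dict: getD e holds the indices of the triangles containing e, with multiplicity
theorem pv_build_getD (l : List (Int × (Int × Int × Int)))
    (d : PySem.Dict (Int × Int) (List Int)) (e : Int × Int) :
    (l.foldl (fun d it => (pvTriEdges it.2).foldl (fun d e => d.modify e [] (· ++ [it.1])) d) d).getD e []
      = d.getD e [] ++ l.flatMap (fun it => List.replicate ((pvTriEdges it.2).count e) it.1) := by
  induction l generalizing d with
  | nil => simp
  | cons it l ih =>
      simp only [List.foldl_cons, List.flatMap_cons, ih, pv_step_getD, List.append_assoc]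

theorem pvDict_getD (triangles : List (Int × Int × Int)) (e : Int × Int) :
    (pvDict triangles).getD e []
      = (PySem.List.enumerate triangles).flatMap
          (fun it => List.replicate ((pvTriEdges it.2).count e) it.1) := by
  rw [pvDict, pv_build_getD]; simp

theorem pv_keys_nodup_aux (l : List (Int × (Int × Int × Int)))
    (d : PySem.Dict (Int × Int) (List Int)) (h : d.keys.Nodup) :
    (l.foldl (fun d it => (pvTriEdges it.2).foldl (fun d e => d.modify e [] (· ++ [it.1])) d) d).keys.Nodup := by
  induction l generalizing d with
  | nil => exact h
  | cons it l ih =>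
      simp only [List.foldl_cons]
      exact ih _ (PySem.Dict.nodup_keys_foldl_modify_key (pvTriEdges it.2) (fun e => e)
        [] (fun _ _ => (· ++ [it.1])) d h)

theorem pv_keys_nodup (triangles : List (Int × Int × Int)) : (pvDict triangles).keys.Nodup :=
  pv_keys_nodup_aux _ _ PySem.Dict.nodup_keys_empty

theorem pv_mem_flat_replicate (l : List (Int × (Int × Int × Int))) (e : Int × Int) (i : Int) :
    i ∈ l.flatMap (fun it => List.replicate ((pvTriEdges it.2).count e) it.1)
      ↔ ∃ it ∈ l, it.1 = i ∧ e ∈ pvTriEdges it.2 := by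
  simp only [List.mem_flatMap, List.mem_replicate]
  constructor
  · rintro ⟨it, hm, hc, rfl⟩
    exact ⟨it, hm, rfl, List.count_pos_iff.mp (Nat.pos_of_ne_zero hc)⟩
  · rintro ⟨it, hm, rfl, he⟩
    exact ⟨it, hm, Nat.pos_iff_ne_zero.mp (List.count_pos_iff.mpr he), rfl⟩

theorem pv_len_flat_replicate (l : List (Int × (Int × Int × Int))) (e : Int × Int) :
    (l.flatMap (fun it => List.replicate ((pvTriEdges it.2).count e) it.1)).length
      = ((l.map (·.2)).flatMap pvTriEdges).count e := by
  induction l with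
  | nil => simp
  | cons it l ih => simp [List.count_append, ih]

theorem pvDict_len (triangles : List (Int × Int × Int)) (e : Int × Int) :
    ((pvDict triangles).getD e []).length = (triangles.flatMap pvTriEdges).count e := by
  rw [pvDict_getD, pv_len_flat_replicate, PySem.List.map_snd_enumerate]

-- membership in the folded delete set
theorem pv_mem_del_fold (es : List (Int × Int)) (s : PySem.Set Int)
    (d : PySem.Dict (Int × Int) (List Int)) (i : Int) :
    i ∈ es.foldl (fun s e => PySem.Set.update s (d.getD e [])) s
      ↔ i ∈ s ∨ ∃ e ∈ es, i ∈ d.getD e [] := by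
  induction es generalizing s with
  | nil => simp
  | cons e es ih =>
      simp only [List.foldl_cons, ih, PySem.Set.mem_update, List.mem_cons]
      constructor
      · rintro (⟨h | h⟩ | ⟨e', hm, h⟩)
        · exact Or.inl h
        · exact Or.inr ⟨e, Or.inl rfl, h⟩
        · exact Or.inr ⟨e', Or.inr hm, h⟩
      · rintro (h | ⟨e', (rfl | hm), h⟩)
        · exact Or.inl (Or.inl h)
        · exact Or.inl (Or.inr h)
        · exact Or.inr ⟨e', hm, h⟩

-- membership in open_edges ↔ the index list has length 1
theorem pv_mem_open (d : PySem.Dict (Int × Int) (List Int)) (hnd : d.keys.Nodup) (e : Int × Int) :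
    e ∈ PySem.Set.ofList ((d.items.filter (fun p => p.2.length == 1)).map (·.1))
      ↔ (d.getD e []).length = 1 := by
  rw [PySem.Set.mem_ofList]
  simp only [List.mem_map, List.mem_filter, beq_iff_eq]
  constructor
  · rintro ⟨⟨k, v⟩, ⟨hm, hl⟩, rfl⟩
    rw [PySem.Dict.getD_of_mem_items _ hm hnd []]; exact hl
  · intro hl
    cases hg : d.get? e with
    | none => rw [PySem.Dict.getD_of_get?_eq_none d [] hg] at hl; simp at hl
    | some v =>
        rw [PySem.Dict.getD_of_get?_eq_some d [] hg] at hl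
        exact ⟨(e, v), ⟨PySem.Dict.mem_items_of_get?_eq_some d hg, hl⟩, rfl⟩

-- the filtered-enumerate comprehension is a plain filter when the predicates agree pointwise
theorem pv_filterMap_enumerate (xs : List (Int × Int × Int))
    (p : Int × (Int × Int × Int) → Bool) (r : (Int × Int × Int) → Bool) :
    ∀ s : Int, (∀ it ∈ PySem.List.enumerate xs s, p it = !(r it.2)) →
    (PySem.List.enumerate xs s).filterMap (fun it => if p it then none else some it.2)
      = xs.filter r := by
  induction xs with
  | nil => intro s _; simp [PySem.List.enumerate_nil]
  | cons x xs ih =>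
      intro s h
      rw [PySem.List.enumerate_cons]
      have hx := h (s, x) List.mem_cons_self
      have hrest := ih (s + 1) (fun it hm => h it (List.mem_cons_of_mem _ hm))
      simp only [List.filterMap_cons, List.filter_cons, hx]
      cases hr : r x <;> simp_all

-- equal indices in enumerate give equal pairs
theorem pv_enumerate_fst_inj (xs : List (Int × Int × Int)) (it it' : Int × (Int × Int × Int))
    (h : it ∈ PySem.List.enumerate xs 0) (h' : it' ∈ PySem.List.enumerate xs 0)
    (hf : it.1 = it'.1) : it = it' := by
  rw [PySem.List.mem_enumerate_iff] at h h'
  obtain ⟨k, hk, rfl⟩ := h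
  obtain ⟨k', hk', rfl⟩ := h'
  simp only [zero_add] at hf ⊢
  have : k = k' := by exact_mod_cast hf
  subst this; rfl

-- ---------- B side: sortedness of sorted2 and correctness of the run scan ----------

-- sorted2's tuple comparison IS the lexicographic strict order on Int × Int
theorem pv_before_eq (a b : Int × Int) :
    (decide (a.1 < b.1) || (!decide (b.1 < a.1) && decide (a.2 < b.2)))
      = decide (toLex a < toLex b) := by
  simp only [← decide_not, ← Bool.decide_and, ← Bool.decide_or]
  rw [decide_eq_decide, Prod.Lex.lt_iff]
  simp only [ofLex_toLex]
  omega

-- folding insertBy with the lex comparison preserves lex-Pairwise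
theorem pv_foldl_insertBy_pairwise (xs : List (Int × Int)) :
    ∀ acc : List (Int × Int), acc.Pairwise (fun a b => toLex a ≤ toLex b) →
    (xs.foldl (fun acc x =>
      PySem.List.insertBy (fun a b => decide ((fun e : Int × Int => toLex e) a < (fun e : Int × Int => toLex e) b)) x acc) acc).Pairwise
      (fun a b => toLex a ≤ toLex b) := by
  induction xs with
  | nil => intro acc hacc; exact hacc
  | cons x xs ih =>
      intro acc hacc
      exact ih _ (PySem.List.insertBy_pairwise_le (fun e : Int × Int => toLex e) x acc hacc)

-- the sorted edge list is lexicographically Pairwise-ordered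
theorem pv_sorted2_pairwise (xs : List (Int × Int)) :
    (PySem.List.sorted2 xs (·.1) (·.2) false).Pairwise
      (fun a b => toLex a ≤ toLex b) := by
  show (xs.foldl (fun acc x =>
      PySem.List.insertBy (fun a b =>
        decide (a.1 < b.1) || (!decide (b.1 < a.1) && decide (a.2 < b.2))) x acc) []).Pairwise _
  have hb : (fun a b : Int × Int =>
      decide (a.1 < b.1) || (!decide (b.1 < a.1) && decide (a.2 < b.2)))
      = fun a b => decide ((fun e : Int × Int => toLex e) a < (fun e : Int × Int => toLex e) b) := by
    funext a b; exact pv_before_eq a b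
  rw [hb]
  exact pv_foldl_insertBy_pairwise xs [] (by simp)

theorem pv_lex_antisymm (a b : Int × Int)
    (h1 : toLex a ≤ toLex b) (h2 : toLex b ≤ toLex a) : a = b := by
  have h := le_antisymm h1 h2
  exact Prod.ext (congrArg (fun z => (ofLex z).1) h) (congrArg (fun z => (ofLex z).2) h)

-- the head element does not reappear after its run is dropped
theorem pv_not_mem_dropWhile (e : Int × Int) (rest : List (Int × Int))
    (hp : (e :: rest).Pairwise (fun a b => toLex a ≤ toLex b)) :
    e ∉ rest.dropWhile (fun x => x == e) := by
  intro hmem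
  cases hr : rest.dropWhile (fun x => x == e) with
  | nil => rw [hr] at hmem; exact List.not_mem_nil hmem
  | cons y0 t =>
      rw [hr] at hmem
      have hy0 : (fun x => x == e) y0 = false := by
        have := List.head?_dropWhile_not (fun x => x == e) rest
        rw [hr] at this; simpa using this
      have hy0e : y0 ≠ e := by simpa using hy0
      have hsub : (y0 :: t).Sublist rest := hr ▸ (List.dropWhile_sublist _)
      have hpw : (y0 :: t).Pairwise (fun a b => toLex a ≤ toLex b) :=
        (List.pairwise_cons.mp hp).2.sublist hsub
      have hle : ∀ z ∈ y0 :: t, toLex e ≤ toLex z := by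
        intro z hz
        exact (List.pairwise_cons.mp hp).1 z (hsub.mem hz)
      rcases List.mem_cons.mp hmem with rfl | hmt
      · exact hy0e rfl
      · exact hy0e (pv_lex_antisymm y0 e
          ((List.pairwise_cons.mp hpw).1 e hmt) (hle y0 List.mem_cons_self))

-- run-scan correctness: on a lex-sorted list, the scan's set holds exactly
-- the seeds plus the elements of count 1
theorem pv_scan_mem (n : Nat) : ∀ (l : List (Int × Int)), l.length ≤ n →
    l.Pairwise (fun a b => toLex a ≤ toLex b) →
    ∀ (s : PySem.Set (Int × Int)) (x : Int × Int),
    x ∈ pvScan l s ↔ x ∈ s ∨ l.count x = 1 := by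
  induction n with
  | zero =>
      intro l hl _ s x
      have : l = [] := List.eq_nil_of_length_eq_zero (Nat.le_zero.mp hl)
      subst this; simp [pvScan]
  | succ n ih =>
      intro l hl hp s x
      cases l with
      | nil => simp [pvScan]
      | cons e rest =>
          have hsplit : rest.takeWhile (fun x => x == e) ++ rest.dropWhile (fun x => x == e) = rest :=
            List.takeWhile_append_dropWhile
          have htw : ∀ y ∈ rest.takeWhile (fun x => x == e), y = e := by
            intro y hy
            simpa using List.mem_takeWhile_imp hy
          have hnd : e ∉ rest.dropWhile (fun x => x == e) := pv_not_mem_dropWhile e rest hp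
          have hlen : (rest.dropWhile (fun x => x == e)).length ≤ n := by
            have h1 : (rest.dropWhile (fun x => x == e)).length ≤ rest.length :=
              List.Sublist.length_le ((List.dropWhile_sublist _))
            simp only [List.length_cons] at hl
            omega
          have hpd : (rest.dropWhile (fun x => x == e)).Pairwise (fun a b => toLex a ≤ toLex b) :=
            (List.pairwise_cons.mp hp).2.sublist ((List.dropWhile_sublist _))
          -- counts
          have hce : (e :: rest).count e = 1 + (rest.takeWhile (fun x => x == e)).length := by
            have h0 : (rest.dropWhile (fun x => x == e)).count e = 0 :=
              List.count_eq_zero.mpr hnd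
            have h1 : (rest.takeWhile (fun x => x == e)).count e
                = (rest.takeWhile (fun x => x == e)).length := by
              rw [List.count_eq_length]
              intro y hy; exact ((htw y hy) ▸ rfl)
            calc (e :: rest).count e
                = rest.count e + 1 := List.count_cons_self
              _ = ((rest.takeWhile (fun x => x == e)).count e
                    + (rest.dropWhile (fun x => x == e)).count e) + 1 := by
                    rw [← List.count_append, hsplit]
              _ = 1 + (rest.takeWhile (fun x => x == e)).length := by rw [h0, h1]; omega
          have hcx : ∀ x : Int × Int, x ≠ e →
              (e :: rest).count x = (rest.dropWhile (fun x => x == e)).count x := by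
            intro x hx
            have h1 : (rest.takeWhile (fun y => y == e)).count x = 0 := by
              rw [List.count_eq_zero]
              intro hmem; exact hx (htw x hmem)
            rw [List.count_cons_of_ne (Ne.symm hx)]
            conv_lhs => rw [← hsplit]
            rw [List.count_append, h1, Nat.zero_add]
          rw [show pvScan (e :: rest) s
              = if (rest.takeWhile (fun x => x == e)).length == 0 then
                  pvScan (rest.dropWhile (fun x => x == e)) (PySem.Set.add s e)
                else pvScan (rest.dropWhile (fun x => x == e)) s from by rw [pvScan]]
          by_cases h0 : (rest.takeWhile (fun x => x == e)).length = 0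
          · rw [if_pos (by simpa using h0)]
            rw [ih _ hlen hpd]
            rcases eq_or_ne x e with rfl | hx
            · have : (rest.dropWhile (fun y => y == x)).count x = 0 := List.count_eq_zero.mpr hnd
              simp [PySem.Set.mem_add, hce, h0, this]
            · rw [hcx x hx]
              constructor
              · rintro (hs | hc)
                · rcases (PySem.Set.mem_add _ _ _).mp hs with hs | rfl
                  · exact Or.inl hs
                  · exact absurd rfl hx
                · exact Or.inr hc
              · rintro (hs | hc)
                · exact Or.inl ((PySem.Set.mem_add _ _ _).mpr (Or.inl hs))
                · exact Or.inr hc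
          · rw [if_neg (by simpa using h0)]
            rw [ih _ hlen hpd]
            rcases eq_or_ne x e with rfl | hx
            · have hc0 : (rest.dropWhile (fun y => y == x)).count x = 0 :=
                List.count_eq_zero.mpr hnd
              rw [hce, hc0]
              constructor
              · rintro (hs | hc)
                · exact Or.inl hs
                · omega
              · rintro (hs | hc)
                · exact Or.inl hs
                · omega
            · rw [hcx x hx]

-- membership in B's open-edge set ↔ the edge occurs exactly once among all edges
theorem pv_mem_scan_sorted (allE : List (Int × Int)) (x : Int × Int) :
    x ∈ pvScan (PySem.List.sorted2 allE (·.1) (·.2) false) PySem.Set.empty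
      ↔ allE.count x = 1 := by
  rw [pv_scan_mem (PySem.List.sorted2 allE (·.1) (·.2) false).length _ le_rfl
      (pv_sorted2_pairwise allE)]
  rw [(PySem.List.sorted2_perm allE (·.1) (·.2) false).count_eq]
  simp [PySem.Set.empty]

-- ===== VERDICT (by name: the statement is the Claim_ definition above) =====
theorem remove_open_edges_spec : Claim_equal_remove_open_edges := by
  intro triangles _
  unfold Spec_remove_open_edges remove_open_edges remove_open_edges_alt
  rw [show (PySem.List.enumerate triangles).foldl
      (fun d it => (pvTriEdges it.2).foldl (fun d e => d.modify e [] (· ++ [it.1])) d)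
      PySem.Dict.empty = pvDict triangles from rfl]
  apply pv_filterMap_enumerate _ _ _ 0
  intro it hmem
  have hmem' := hmem
  rw [PySem.List.mem_enumerate_iff] at hmem'
  obtain ⟨k, hk, hit⟩ := hmem'
  -- i ∈ delete-set ↔ some edge of it.2 is open (count 1 among all edges)
  have hdel : (PySem.Set.contains
        ((PySem.Set.ofList (((pvDict triangles).items.filter (fun p => p.2.length == 1)).map (·.1))).foldl
          (fun s e => PySem.Set.update s ((pvDict triangles).getD e [])) PySem.Set.empty) it.1) = true
      ↔ ∃ e ∈ pvTriEdges it.2, (triangles.flatMap pvTriEdges).count e = 1 := by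
    rw [PySem.Set.contains_iff, pv_mem_del_fold]
    simp only [PySem.Set.empty, List.not_mem_nil, false_or]
    constructor
    · rintro ⟨e, hopen, hin⟩
      rw [pv_mem_open _ (pv_keys_nodup triangles)] at hopen
      rw [pvDict_getD, pv_mem_flat_replicate] at hin
      obtain ⟨it', hmem2, hfst, hedge⟩ := hin
      have : it' = it := pv_enumerate_fst_inj _ _ _ hmem2 hmem hfst
      subst this
      exact ⟨e, hedge, by rw [← pvDict_len]; exact hopen⟩
    · rintro ⟨e, hedge, hcnt⟩
      refine ⟨e, ?_, ?_⟩
      · rw [pv_mem_open _ (pv_keys_nodup triangles), pvDict_len]; exact hcnt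
      · rw [pvDict_getD, pv_mem_flat_replicate]; exact ⟨it, hmem, rfl, hedge⟩
  -- B keeps it.2 iff none of its edges is in the scanned open-edge set
  have hb : ((pvTriEdges it.2).any (fun e =>
      PySem.Set.contains (pvScan (PySem.List.sorted2 (triangles.flatMap pvTriEdges) (·.1) (·.2) false)
        PySem.Set.empty) e)) = true
      ↔ ∃ e ∈ pvTriEdges it.2, (triangles.flatMap pvTriEdges).count e = 1 := by
    rw [List.any_eq_true]
    constructor
    · rintro ⟨e, he, hc⟩
      exact ⟨e, he, (pv_mem_scan_sorted _ e).mp ((PySem.Set.contains_iff _ _).mp hc)⟩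
    · rintro ⟨e, he, hc⟩
      exact ⟨e, he, (PySem.Set.contains_iff _ _).mpr ((pv_mem_scan_sorted _ e).mpr hc)⟩
  rw [← hb] at hdel
  simp only [Bool.not_not]
  cases ha : (pvTriEdges it.2).any (fun e =>
      PySem.Set.contains (pvScan (PySem.List.sorted2 (triangles.flatMap pvTriEdges) (·.1) (·.2) false)
        PySem.Set.empty) e) with
  | true => exact hdel.mpr ha
  | false =>
      rw [Bool.eq_false_iff]
      intro hc
      have hfin := hdel.mp hc
      rw [ha] at hfin
      exact Bool.false_ne_true hfin
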